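-- pv_equiv track=rewrite | github.com/LisaMazzuoli/AoC | day_6/second.py | search
-- ===== SOURCE A (Python) =====
-- def search(super_line, const):
--     result = 14  # almeno al quarto posto
--     while len(super_line) > 13 and const == 0:
--         newset = set(super_line[:14])
--         if len(super_line[:14]) == len(newset):
--             const = 1
--         else:
--             result += 1
--         super_line.remove(super_line[0])
--         newset.clear()
--
--     return result
-- ===== SOURCE B (Python) =====
-- def search(super_line, const):
--     # Single pass with a sliding 14-element window over the unchanged list
--     # (no front-popping, no re-slicing). NOTE: unlike A, this does not mutate
--     # super_line; the equivalence claimed is about the return value only.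
--     if const != 0:
--         return 14
--     window = []
--     pos = 0
--     for ch in super_line:
--         window.append(ch)
--         pos += 1
--         if len(window) == 14:
--             if len(set(window)) == 14:
--                 return pos
--             window.pop(0)
--     return pos + 1 if pos > 13 else 14
-- ===== Notes on version B (the rewrite author's own statement) =====
-- stated objective: alternative
-- what changed: A repeatedly slices the first 14 elements off a shrinking list and pops its front each iteration; B makes a single left-to-right pass over the unchanged list maintaining a 14-element sliding window and a position counter. B does not mutate super_line (A consumes it in place); the equivalence is about the return value.
import Mathlib
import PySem

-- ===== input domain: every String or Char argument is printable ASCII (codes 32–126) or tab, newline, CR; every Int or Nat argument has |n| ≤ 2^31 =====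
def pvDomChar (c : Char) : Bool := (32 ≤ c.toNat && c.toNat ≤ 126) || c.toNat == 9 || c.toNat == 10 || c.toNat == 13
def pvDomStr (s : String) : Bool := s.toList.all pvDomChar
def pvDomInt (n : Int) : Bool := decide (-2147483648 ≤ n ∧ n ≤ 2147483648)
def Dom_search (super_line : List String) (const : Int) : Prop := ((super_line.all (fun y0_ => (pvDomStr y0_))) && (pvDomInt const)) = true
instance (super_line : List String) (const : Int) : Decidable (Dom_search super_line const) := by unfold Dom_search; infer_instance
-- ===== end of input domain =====

-- B replaces A's while-loop over a shrinking list (re-slicing and popping its front each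
-- round) by a single left-to-right pass over the unchanged list keeping a 14-element
-- sliding window; A mutates super_line in place (consumes it from the front) while B
-- does not — the equivalence proved here is about the return value only.

-- ===== PORT A =====
-- A's while loop: state (super_line, const, result); `super_line.remove(super_line[0])`
-- removes the first occurrence of the head, i.e. the head itself: the list becomes its tail.
def searchLoopA (l : List String) (const : Int) (result : Int) : Int :=
  if h : 13 < l.length ∧ const = 0 then
    if (PySem.Set.ofList (PySem.List.slice l none (some 14))).length
        = (PySem.List.slice l none (some 14)).length then
      searchLoopA l.tail 1 result                -- const = 1
    else
      searchLoopA l.tail const (result + 1)      -- result += 1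
  else result
termination_by l.length
decreasing_by all_goals (simp [List.length_tail]; omega)

def search (super_line : List String) (const : Int) : Int :=
  searchLoopA super_line const 14

-- ===== PORT B =====
-- B's for loop over super_line with state (window, pos); window.pop(0) is the tail.
def searchLoopB (l : List String) (window : List String) (pos : Int) : Int :=
  match l with
  | [] => if 13 < pos then pos + 1 else 14
  | ch :: rest =>
    let w := window ++ [ch]                       -- window.append(ch)
    let p := pos + 1
    if w.length = 14 then
      if (PySem.Set.ofList w).length = 14 then p
      else searchLoopB rest w.tail p              -- window.pop(0)
    else searchLoopB rest w p

def search_alt (super_line : List String) (const : Int) : Int :=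
  if const ≠ 0 then 14
  else searchLoopB super_line [] 0

-- ===== PRECONDITION & SPEC =====
def Spec_search (super_line : List String) (const : Int) (out : Int) : Prop := out = search_alt super_line const
instance (super_line : List String) (const : Int) (out : Int) : Decidable (Spec_search super_line const out) := by unfold Spec_search; infer_instance

-- ===== CLAIM (what is proved, stated in full; the proofs are below) =====
def Claim_equal_search : Prop := ∀ (super_line : List String) (const : Int), Dom_search super_line const → Spec_search super_line const (search super_line const)

-- ===== LEMMAS AND PROOFS =====

-- non-dependent unfolding of A's loop
theorem searchLoopA_eq (l : List String) (const result : Int) :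
    searchLoopA l const result =
      if 13 < l.length ∧ const = 0 then
        (if (PySem.Set.ofList (PySem.List.slice l none (some 14))).length
            = (PySem.List.slice l none (some 14)).length
         then searchLoopA l.tail 1 result
         else searchLoopA l.tail const (result + 1))
      else result := by
  rw [searchLoopA, dite_eq_ite]

-- with const = 1 the while condition is false: A returns the accumulator
theorem searchLoopA_one (l : List String) (result : Int) :
    searchLoopA l 1 result = result := by
  rw [searchLoopA_eq]; simp

-- super_line[:14] is take 14
theorem slice14 (l : List String) :
    PySem.List.slice l none (some 14) = l.take 14 := by
  rw [show ((14 : Int)) = ((14 : Nat) : Int) from rfl, PySem.List.slice_to_natCast]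

-- steady phase: once B's window holds 13 elements (window = the 13 chars before
-- position pos, 13 ≤ pos), B's remaining run equals A's loop on window ++ rest
-- with const = 0 and accumulator pos + 1.
theorem loopB_eq_loopA (rest : List String) :
    ∀ (window : List String) (pos : Int), window.length = 13 → 13 ≤ pos →
      searchLoopB rest window pos = searchLoopA (window ++ rest) 0 (pos + 1) := by
  induction rest with
  | nil =>
    intro window pos hw hp
    rw [searchLoopA_eq, if_neg (by simp [hw])]
    unfold searchLoopB
    split_ifs with h
    · rfl
    · omega
  | cons x rs ih =>
    intro window pos hw hp
    have hwin : window ≠ [] := by intro h; simp [h] at hw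
    have htake : List.take 14 (window ++ x :: rs) = window ++ [x] := by
      rw [List.take_append]; simp [hw]
    have htail : (window ++ x :: rs).tail = (window ++ [x]).tail ++ rs := by
      rw [List.tail_append_of_ne_nil hwin, List.tail_append_of_ne_nil hwin]; simp
    rw [searchLoopA_eq, if_pos ⟨by simp [hw], rfl⟩, slice14, htake]
    unfold searchLoopB
    simp only [List.length_append, hw, List.length_cons, List.length_nil]
    norm_num
    split_ifs with hdist
    · rw [searchLoopA_one]
    · rw [htail, ih _ _ (by simp [List.length_tail, hw]) (by omega)]
-- ramp-up phase: while the window (= the whole processed prefix) has fewer than 13 chars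
theorem loopB_ramp (rest : List String) :
    ∀ (window : List String) (pos : Int), window.length ≤ 12 → (window.length : Int) = pos →
      searchLoopB rest window pos = searchLoopA (window ++ rest) 0 14 := by
  induction rest with
  | nil =>
    intro window pos hw hp
    rw [searchLoopA_eq, if_neg (by simp; omega)]
    unfold searchLoopB
    rw [if_neg (by omega)]
  | cons x rs ih =>
    intro window pos hw hp
    unfold searchLoopB
    rw [if_neg (by simp; omega)]
    by_cases h13 : (window ++ [x]).length = 13
    · rw [loopB_eq_loopA rs _ _ h13 (by simp at h13; omega)]
      have : pos + 1 + 1 = 14 := by simp at h13; omega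
      rw [this]; simp
    · rw [ih (window ++ [x]) (pos + 1) (by simp; simp at h13; omega) (by simp; omega)]
      simp

-- ===== VERDICT (by name: the statement is the Claim_ definition above) =====
theorem search_spec : Claim_equal_search := by
  intro super_line const _
  unfold Spec_search search search_alt
  by_cases hc : const = 0
  · subst hc
    rw [if_neg (by simp)]
    rw [loopB_ramp super_line [] 0 (by simp) (by simp)]
    simp
  · rw [if_pos hc, searchLoopA_eq, if_neg (by simp [hc])]
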